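-- pv_equiv track=rewrite | github.com/Jenniebn/python | CS8_finalproject.py | text_to_rows
-- ===== SOURCE A (Python) =====
-- def text_to_rows(plaintext, key):
--     """
--     This function returns a list of lists, which represents the grid
--     filled out with the text of our plaintext: each row is a list with
--     the characters of the plaintext stored as individual elements.
--     First, if the key is less than or equal to 0, function returns None.
--     Then, if plaintext is empty, function returns [].
--     Each letter in plaintext will be appended in row. If the len(row)
--     divides key with no remainder, that means we don't need to fill in extra
--     random characters and we only need to append list of key-length characters
--     into lst len(row) // key times. However, if len(row) does not divide key,
--     then we need to fill in extra characters and append list of key-length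
--     characters into lst len(row) // key + 1 times.
--     Under each loop for j, we are checking if we have appended every key-length
--     of list of characters in row to lst. If the len(row) > key, we append lst
--     with row[:key] and update row to be without the list of characters that were
--     appended to lst already. When len(row) equals or less than key, we will apend
--     the rest of key-length list of elements in row to list.
--     """
--     row = []
--     lst = []
--     if key <= 0:
--         return None
--     elif len(plaintext) == 0:
--         return []
--     else:
--         for i in plaintext:
--             row.append(i)
--         if len(row) % key == 0:
--             for j in range(0, len(row) // key):
--                 if len(row) > key:
--                     lst.append(row[:key])
--                     row = row[key:]
--                 else:
--                     lst.append(row[:key])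
--         else:
--             for j in range(0, len(row) // key + 1):
--                 if len(row) > key:
--                     lst.append(row[:key])
--                     row = row[key:]
--                 else:
--                     lst.append(row[:key])
--         return lst
-- ===== SOURCE B (Python) =====
-- def text_to_rows(plaintext, key):
--     if key <= 0:
--         return None
--     if len(plaintext) == 0:
--         return []
--     rows = []
--     buf = []
--     for ch in plaintext:
--         buf.append(ch)
--         if len(buf) == key:
--             rows.append(buf)
--             buf = []
--     if buf:
--         rows.append(buf)
--     return rows
-- ===== Notes on version B (the rewrite author's own statement) =====
-- stated objective: simpler
-- what changed: Replaces A's count-the-iterations scheme (len%key case split, then a range loop that repeatedly slices row[:key]/row[key:]) with a single pass that appends each character to a buffer, flushing it whenever it reaches key and once more at the end.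
import Mathlib
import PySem

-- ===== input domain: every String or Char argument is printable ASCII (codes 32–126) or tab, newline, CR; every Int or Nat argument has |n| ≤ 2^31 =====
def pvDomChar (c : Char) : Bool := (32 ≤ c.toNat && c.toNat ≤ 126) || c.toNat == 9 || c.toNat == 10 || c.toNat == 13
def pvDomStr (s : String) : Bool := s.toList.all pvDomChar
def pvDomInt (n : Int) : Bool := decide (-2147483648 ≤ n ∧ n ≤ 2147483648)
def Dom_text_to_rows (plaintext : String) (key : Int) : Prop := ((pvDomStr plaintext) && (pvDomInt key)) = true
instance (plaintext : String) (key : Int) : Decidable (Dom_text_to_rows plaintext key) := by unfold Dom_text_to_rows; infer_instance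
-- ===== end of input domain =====

-- B replaces A's case-split-and-count slicing loops by one pass with a row buffer flushed at length key (simpler).

-- ===== PORT A =====
-- one iteration of A's 'for j in range(...)' body, on the state (lst, row)
def pvAStep (key : Int) (st : List (List String) × List String) : List (List String) × List String :=
  if (st.2.length : Int) > key then
    (st.1 ++ [PySem.List.slice st.2 none (some key)], PySem.List.slice st.2 (some key) none)
  else
    (st.1 ++ [PySem.List.slice st.2 none (some key)], st.2)

def text_to_rows (plaintext : String) (key : Int) : Option (List (List String)) :=
  let row : List String := []
  let lst : List (List String) := []
  if key ≤ 0 then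
    none
  else if plaintext.toList.length = 0 then
    some []
  else
    let row := plaintext.toList.foldl (fun r c => r ++ [String.ofList [c]]) row
    if PySem.Int.mod (row.length : Int) key = 0 then
      some ((PySem.List.pyRange 0 (PySem.Int.floordiv (row.length : Int) key) 1).foldl
        (fun st _ => pvAStep key st) (lst, row)).1
    else
      some ((PySem.List.pyRange 0 (PySem.Int.floordiv (row.length : Int) key + 1) 1).foldl
        (fun st _ => pvAStep key st) (lst, row)).1

-- ===== PORT B =====
def text_to_rows_alt (plaintext : String) (key : Int) : Option (List (List String)) :=
  if key ≤ 0 then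
    none
  else if plaintext.toList.length = 0 then
    some []
  else
    let st := plaintext.toList.foldl
      (fun (st : List (List String) × List String) c =>
        let buf := st.2 ++ [String.ofList [c]]
        if (buf.length : Int) = key then (st.1 ++ [buf], ([] : List String)) else (st.1, buf))
      (([] : List (List String)), ([] : List String))
    some (if st.2 ≠ [] then st.1 ++ [st.2] else st.1)

-- ===== PRECONDITION & SPEC =====
def Spec_text_to_rows (plaintext : String) (key : Int) (out : Option (List (List String))) : Prop := out = text_to_rows_alt plaintext key
instance (plaintext : String) (key : Int) (out : Option (List (List String))) : Decidable (Spec_text_to_rows plaintext key out) := by unfold Spec_text_to_rows; infer_instance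

-- ===== CLAIM (what is proved, stated in full; the proofs are below) =====
def Claim_equal_text_to_rows : Prop := ∀ (plaintext : String) (key : Int), Dom_text_to_rows plaintext key → Spec_text_to_rows plaintext key (text_to_rows plaintext key)

-- ===== LEMMAS AND PROOFS =====

-- the common specification: split l into consecutive blocks of k (last one possibly short)
def pvChunks (k : Nat) (l : List String) : List (List String) :=
  if h : l = [] ∨ k = 0 then [] else l.take k :: pvChunks k (l.drop k)
termination_by l.length
decreasing_by
  obtain ⟨h1, h2⟩ := not_or.mp h
  simp only [List.length_drop]
  rcases l with _ | ⟨a, t⟩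
  · exact absurd rfl h1
  · simp only [List.length_cons]; omega

lemma pvChunks_nil (k : Nat) : pvChunks k [] = [] := by
  unfold pvChunks; simp

lemma pvChunks_of_ne (k : Nat) (l : List String) (hl : l ≠ []) (hk : k ≠ 0) :
    pvChunks k l = l.take k :: pvChunks k (l.drop k) := by
  rw [pvChunks]; simp [hl, hk]

-- a fold that ignores the list elements is function iteration
lemma pvFoldl_const {α β : Type} (f : β → β) (l : List α) (init : β) :
    l.foldl (fun b _ => f b) init = f^[l.length] init := by
  induction l generalizing init with
  | nil => rfl
  | cons a t ih => simp [List.foldl_cons, ih, Function.iterate_succ_apply]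

-- A's iteration count
def pvIters (m k : Nat) : Nat := if m % k = 0 then m / k else m / k + 1

-- A's loop computes the chunks
lemma pvAStep_iter (k : Nat) (hk : 0 < k) :
    ∀ m, ∀ row : List String, row.length = m → 0 < m → ∀ acc,
      ((pvAStep (k : Int))^[pvIters m k] (acc, row)).1 = acc ++ pvChunks k row := by
  intro m
  induction m using Nat.strong_induction_on with
  | _ m ih =>
    intro row hlen hpos acc
    by_cases hgt : k < m
    · have hit : pvIters m k = pvIters (m - k) k + 1 := by
        unfold pvIters
        have h1 : (m - k) % k = m % k := by
          conv_rhs => rw [show m = (m - k) + k from by omega]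
          simp [Nat.add_mod_right]
        have h2 : m / k = (m - k) / k + 1 := by
          conv_lhs => rw [show m = (m - k) + k from by omega]
          rw [Nat.add_div_right _ hk]
        rw [h1, h2]; split <;> rfl
      have hstep : pvAStep (k : Int) (acc, row) =
          (acc ++ [row.take k], row.drop k) := by
        unfold pvAStep
        have : ((row.length : Int) > (k : Int)) := by
          simp only [hlen]; exact_mod_cast hgt
        simp [this, PySem.List.slice_to_natCast, PySem.List.slice_from_natCast]
      rw [hit, Function.iterate_succ_apply, hstep]
      have hdrop : (row.drop k).length = m - k := by simp [hlen]
      rw [ih (m - k) (by omega) (row.drop k) hdrop (by omega)]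
      rw [pvChunks_of_ne k row (by intro h; simp [h] at hlen; omega) (by omega)]
      simp
    · -- m ≤ k : exactly one iteration remains
      have hle : m ≤ k := by omega
      have hit : pvIters m k = 1 := by
        unfold pvIters
        by_cases he : m = k
        · subst he; simp [Nat.mod_self, Nat.div_self hk]
        · have hlt : m < k := by omega
          have hm : m % k = m := Nat.mod_eq_of_lt hlt
          have hm0 : m ≠ 0 := by omega
          simp [hm, Nat.div_eq_of_lt hlt, hm0]
      have hstep : pvAStep (k : Int) (acc, row) = (acc ++ [row.take k], row) := by
        unfold pvAStep
        have hng : ¬ ((row.length : Int) > (k : Int)) := by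
          simp only [hlen]; exact_mod_cast (by omega : ¬ k < m)
        simp [hng, PySem.List.slice_to_natCast]
      rw [hit, Function.iterate_one, hstep]
      rw [pvChunks_of_ne k row (by intro h; simp [h] at hlen; omega) (by omega)]
      have hdrop : row.drop k = [] := by
        apply List.drop_eq_nil_of_le; omega
      have htake : row.take k = row := List.take_of_length_le (by omega)
      simp [hdrop, htake, pvChunks_nil]

-- one iteration of B's character loop, on the state (rows, buf), element already a string
def pvBStep (k : Nat) (st : List (List String) × List String) (x : String) :
    List (List String) × List String :=
  if ((st.2 ++ [x]).length : Int) = (k : Int) then (st.1 ++ [st.2 ++ [x]], ([] : List String))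
  else (st.1, st.2 ++ [x])

-- B's fold (over the already-mapped list of one-char strings) computes the chunks
lemma pvBStep_fold (k : Nat) (hk : 0 < k) :
    ∀ l : List String, ∀ acc : List (List String), ∀ buf : List String, buf.length < k →
      (if (l.foldl (pvBStep k) (acc, buf)).2 ≠ [] then
        (l.foldl (pvBStep k) (acc, buf)).1 ++ [(l.foldl (pvBStep k) (acc, buf)).2]
       else (l.foldl (pvBStep k) (acc, buf)).1) = acc ++ pvChunks k (buf ++ l) := by
  intro l
  induction l with
  | nil =>
    intro acc buf hbuf
    simp only [List.foldl_nil, List.append_nil]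
    by_cases hb : buf = []
    · simp [hb, pvChunks_nil]
    · rw [pvChunks_of_ne k buf hb (by omega)]
      have htake : buf.take k = buf := List.take_of_length_le (by omega)
      have hdrop : buf.drop k = [] := List.drop_eq_nil_of_le (by omega)
      simp [hb, htake, hdrop, pvChunks_nil]
  | cons c t ih =>
    intro acc buf hbuf
    simp only [List.foldl_cons]
    by_cases hfull : (buf ++ [c]).length = k
    · have hcond : (((buf ++ [c]).length : Int) = (k : Int)) := by exact_mod_cast hfull
      have hstep : pvBStep k (acc, buf) c = (acc ++ [buf ++ [c]], ([] : List String)) := by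
        unfold pvBStep; rw [if_pos hcond]
      rw [hstep]
      rw [ih (acc ++ [buf ++ [c]]) [] (by simpa using hk)]
      have hne : buf ++ c :: t ≠ [] := by simp
      rw [show buf ++ c :: t = (buf ++ [c]) ++ t from by simp]
      rw [pvChunks_of_ne k ((buf ++ [c]) ++ t) (by simp) (by omega)]
      rw [show ((buf ++ [c]) ++ t).take k = buf ++ [c] from by
        rw [← hfull]; exact List.take_left]
      rw [show ((buf ++ [c]) ++ t).drop k = t from by
        rw [← hfull]; exact List.drop_left]
      simp
    · have hcond : ¬ (((buf ++ [c]).length : Int) = (k : Int)) := by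
        intro h; exact hfull (by exact_mod_cast h)
      have hstep : pvBStep k (acc, buf) c = (acc, buf ++ [c]) := by
        unfold pvBStep; rw [if_neg hcond]
      rw [hstep]
      rw [ih acc (buf ++ [c]) (by simp at hfull ⊢; omega)]
      simp

lemma pvKeyPos_toNat (key : Int) (h : ¬ key ≤ 0) : ((key.toNat : Nat) : Int) = key := by omega

-- ===== VERDICT (by name: the statement is the Claim_ definition above) =====
theorem text_to_rows_spec : Claim_equal_text_to_rows := by
  intro plaintext key _
  unfold Spec_text_to_rows
  by_cases hk : key <= 0
  case pos =>
    unfold text_to_rows text_to_rows_alt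
    simp [hk]
  case neg =>
  by_cases hnil : plaintext.toList.length = 0
  case pos =>
    unfold text_to_rows text_to_rows_alt
    simp [hk, hnil]
  case neg =>
  set k : Nat := key.toNat with hkdef
  have hkcast : ((k : Nat) : Int) = key := pvKeyPos_toNat key hk
  have hkpos : 0 < k := by omega
  set row : List String := plaintext.toList.map (fun c => String.ofList [c]) with hrowdef
  have hrow : plaintext.toList.foldl (fun r c => r ++ [String.ofList [c]]) [] = row := by
    simpa using PySem.List.foldl_append_singleton_eq_map (fun c => String.ofList [c]) plaintext.toList ([] : List String)
  have hrlen : row.length = plaintext.toList.length := by simp [hrowdef]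
  have hrpos : 0 < row.length := by omega
  -- A's value
  have hA : text_to_rows plaintext key = some (pvChunks k row) := by
    unfold text_to_rows
    rw [if_neg hk, if_neg hnil, hrow]
    have hAiter : forall n : Int, 0 <= n ->
        ((PySem.List.pyRange 0 n 1).foldl (fun st _ => pvAStep key st)
          (([] : List (List String)), row)) =
        (pvAStep key)^[n.toNat] (([] : List (List String)), row) := by
      intro n hn
      rw [pvFoldl_const (pvAStep key) _ _, PySem.List.length_pyRange_one]
      congr 1; omega
    have hAres := pvAStep_iter k hkpos row.length row rfl hrpos []
    simp only [List.nil_append, hkcast] at hAres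
    by_cases hmod : PySem.Int.mod (row.length : Int) key = 0
    case pos =>
      rw [if_pos hmod]
      have hmodnat : row.length % k = 0 := by
        rw [<- hkcast, PySem.Int.mod_natCast] at hmod; exact_mod_cast hmod
      have hn : (0:Int) <= PySem.Int.floordiv (row.length : Int) key := by
        rw [<- hkcast, PySem.Int.floordiv_natCast]; exact Int.natCast_nonneg _
      rw [hAiter _ hn]
      have hcount : (PySem.Int.floordiv (row.length : Int) key).toNat = pvIters row.length k := by
        rw [<- hkcast, PySem.Int.floordiv_natCast, Int.toNat_natCast]
        unfold pvIters; rw [if_pos hmodnat]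
      rw [hcount, hAres]
    case neg =>
      rw [if_neg hmod]
      have hmodnat : ¬ row.length % k = 0 := by
        intro h
        apply hmod
        rw [<- hkcast, PySem.Int.mod_natCast, h]; rfl
      have hn : (0:Int) <= PySem.Int.floordiv (row.length : Int) key + 1 := by
        rw [<- hkcast, PySem.Int.floordiv_natCast]; positivity
      rw [hAiter _ hn]
      have hcount : (PySem.Int.floordiv (row.length : Int) key + 1).toNat = pvIters row.length k := by
        rw [<- hkcast, PySem.Int.floordiv_natCast]
        unfold pvIters; rw [if_neg hmodnat]
        rw [show ((row.length / k : Nat) : Int) + 1 = ((row.length / k + 1 : Nat) : Int) from by push_cast; ring]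
        exact Int.toNat_natCast _
      rw [hcount, hAres]
  -- B's value
  have hBalt : text_to_rows_alt plaintext key = some (pvChunks k row) := by
    unfold text_to_rows_alt
    rw [if_neg hk, if_neg hnil]
    have hB : plaintext.toList.foldl
          (fun (st : List (List String) × List String) c =>
            let buf := st.2 ++ [String.ofList [c]]
            if (buf.length : Int) = key then (st.1 ++ [buf], ([] : List String)) else (st.1, buf))
          (([] : List (List String)), ([] : List String)) =
        row.foldl (pvBStep k) (([] : List (List String)), ([] : List String)) := by
      rw [hrowdef, List.foldl_map]
      unfold pvBStep
      simp only [hkcast]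
    have hBres := pvBStep_fold k hkpos row [] [] (by simpa using hkpos)
    simp only [List.nil_append] at hBres
    simp only [hB]
    rw [hBres]
  rw [hA, hBalt]
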